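-- pv_equiv track=rewrite | github.com/cryptoadvance/specter-desktop | tests/test_util_mnemonic.py | count_multi_occurrence_languages
-- ===== SOURCE A (Python) =====
-- from collections import Counter, defaultdict
-- from itertools import combinations
--
-- def count_multi_occurrence_languages(word_lists_dict):
--     # Create a Counter to store occurrences of words across different lists
--     word_counter = Counter()
--
--     # Create a defaultdict to store the lists in which each word occurs
--     word_lists_indices = defaultdict(list)
--
--     # Iterate over each language and its corresponding word list
--     for language, word_list in word_lists_dict.items():
--         # Update the counter with the words from the current list
--         word_counter.update(word_list)
--
--         # Update the word_lists_indices with the lists in which each word occurs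
--         for word in set(word_list):
--             word_lists_indices[word].append(language)
--
--     # Filter words that occurred more than once across different lists
--     multi_occurrence_languages = Counter()
--     for word, count in word_counter.items():
--         if count > 1:
--             language_combinations = combinations(word_lists_indices[word], 2)
--             multi_occurrence_languages.update(language_combinations)
--
--     return multi_occurrence_languages
-- ===== SOURCE B (Python) =====
-- from collections import Counter
-- from itertools import combinations
--
--
-- def count_multi_occurrence_languages(word_lists_dict):
--     # Freeze each language's word list into a set once, up front.
--     lang_sets = {lang: set(words) for lang, words in word_lists_dict.items()}
--
--     # Single pass over the word stream: the first time a word is seen, probe every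
--     # language set for it and credit one count to each ordered pair of holding
--     # languages.  No global word counter or word->languages mapping is built.
--     result = Counter()
--     seen = set()
--     for words in word_lists_dict.values():
--         for word in words:
--             if word not in seen:
--                 seen.add(word)
--                 holders = [lang for lang, s in lang_sets.items() if word in s]
--                 result.update(combinations(holders, 2))
--     return result
-- ===== Notes on version B (the rewrite author's own statement) =====
-- stated objective: alternative
-- what changed: B never builds A's global word Counter or word-to-languages index: it freezes one membership set per language up front, then in a single pass over the word stream handles each distinct word once (seen-set skip) by probing every language set for it and crediting the ordered pairs of holding languages directly, with no count>1 filtering stage.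
import Mathlib
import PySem

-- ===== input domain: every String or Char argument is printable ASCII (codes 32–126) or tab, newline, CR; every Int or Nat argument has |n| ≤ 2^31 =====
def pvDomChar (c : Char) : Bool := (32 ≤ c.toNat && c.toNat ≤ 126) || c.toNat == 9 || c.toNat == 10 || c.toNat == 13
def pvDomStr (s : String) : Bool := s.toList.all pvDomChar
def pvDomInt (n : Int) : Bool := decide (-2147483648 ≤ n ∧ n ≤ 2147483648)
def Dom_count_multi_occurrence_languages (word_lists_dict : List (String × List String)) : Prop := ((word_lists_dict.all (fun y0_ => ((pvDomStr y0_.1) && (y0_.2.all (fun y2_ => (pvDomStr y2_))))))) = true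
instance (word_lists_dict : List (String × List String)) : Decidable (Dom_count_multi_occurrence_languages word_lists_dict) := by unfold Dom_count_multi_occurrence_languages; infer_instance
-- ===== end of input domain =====

-- B replaces A's global word Counter + word→languages index with per-language membership
-- sets probed once per distinct word during a single pass (objective: alternative).


-- ===== PORT A =====
-- itertools.combinations(xs, 2), specialised to pairs because Python's 2-tuples are products
-- here; index-lexicographic order.  (A library function; B's port below uses it too.)
def combos2 {α : Type} : List α → List (α × α)
  | [] => []
  | x :: rest => rest.map (fun y => (x, y)) ++ combos2 rest

-- word_counter.update(word_list): one +1 per occurrence, new keys appended at first occurrence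
def aCount (c : PySem.Dict String Int) (w : String) : PySem.Dict String Int :=
  c.insert w (c.getD w 0 + 1)

-- word_lists_indices[word].append(language)  (defaultdict(list) read = getD [])
def aIndex (lang : String) (ix : PySem.Dict String (List String)) (w : String) :
    PySem.Dict String (List String) :=
  ix.insert w (ix.getD w [] ++ [lang])

-- body of 'for language, word_list in word_lists_dict.items()'.  'for word in set(word_list)'
-- iterates a Python set; the resulting dict is only ever LOOKED UP afterwards, so the result
-- does not depend on that order and PySem.Set.ofList (first-occurrence order) is exact here.
def aStep (st : PySem.Dict String Int × PySem.Dict String (List String))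
    (item : String × List String) :
    PySem.Dict String Int × PySem.Dict String (List String) :=
  (item.2.foldl aCount st.1, (PySem.Set.ofList item.2).foldl (aIndex item.1) st.2)

-- multi_occurrence_languages.update(language_combinations): one +1 per emitted pair
def aBump (m : PySem.Dict (String × String) Int) (p : String × String) :
    PySem.Dict (String × String) Int :=
  m.insert p (m.getD p 0 + 1)

def count_multi_occurrence_languages (word_lists_dict : List (String × List String)) :
    List (String × String × Int) :=
  let st := word_lists_dict.foldl aStep (PySem.Dict.empty, PySem.Dict.empty)
  let res := st.1.items.foldl
    (fun (m : PySem.Dict (String × String) Int) wc =>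
      if wc.2 > 1 then (combos2 (st.2.getD wc.1 [])).foldl aBump m else m)
    PySem.Dict.empty
  res.items.map (fun p => (p.1.1, p.1.2, p.2))

-- ===== PORT B =====
-- [lang for lang, s in lang_sets.items() if word in s]
def bHolders (ls : PySem.Dict String (PySem.Set String)) (w : String) : List String :=
  ls.items.filterMap (fun e => if w ∈ e.2 then some e.1 else none)

-- result.update(combinations(holders, 2)): one +1 per pair (Counter.update, same library call as A's)
def bBump (m : PySem.Dict (String × String) Int) (p : String × String) :
    PySem.Dict (String × String) Int :=
  m.insert p (m.getD p 0 + 1)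

-- body of 'for word in words' (state = (seen, result))
def bWordStep (ls : PySem.Dict String (PySem.Set String))
    (st : PySem.Set String × PySem.Dict (String × String) Int) (w : String) :
    PySem.Set String × PySem.Dict (String × String) Int :=
  if w ∈ st.1 then st
  else (PySem.Set.add st.1 w, (combos2 (bHolders ls w)).foldl bBump st.2)

def count_multi_occurrence_languages_alt (word_lists_dict : List (String × List String)) :
    List (String × String × Int) :=
  let ls := word_lists_dict.foldl
    (fun m it => m.insert it.1 (PySem.Set.ofList it.2)) PySem.Dict.empty
  let st := word_lists_dict.foldl (fun st it => it.2.foldl (bWordStep ls) st)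
    (PySem.Set.empty, PySem.Dict.empty)
  st.2.items.map (fun p => (p.1.1, p.1.2, p.2))

-- ===== PRECONDITION & SPEC =====
-- Pre_ excludes association lists with duplicate language keys: a Python dict argument cannot
-- carry them (duplicates collapse before A ever runs), so the raw-list behaviour is unspecified.
def Pre_count_multi_occurrence_languages (word_lists_dict : List (String × List String)) : Prop :=
  (word_lists_dict.map Prod.fst).Nodup

instance (word_lists_dict : List (String × List String)) :
    Decidable (Pre_count_multi_occurrence_languages word_lists_dict) := by
  unfold Pre_count_multi_occurrence_languages; infer_instance

def pvWitness_count_multi_occurrence_languages : (List (String × List String)) :=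
  [("en", ["abandon", "ability"]), ("fr", ["abandon", "abeille"])]

def Spec_count_multi_occurrence_languages (word_lists_dict : List (String × List String)) (out : List (String × String × Int)) : Prop := out = count_multi_occurrence_languages_alt word_lists_dict
instance (word_lists_dict : List (String × List String)) (out : List (String × String × Int)) : Decidable (Spec_count_multi_occurrence_languages word_lists_dict out) := by unfold Spec_count_multi_occurrence_languages; infer_instance

-- ===== CLAIM (what is proved, stated in full; the proofs are below) =====
def Claim_equal_count_multi_occurrence_languages : Prop := ∀ (word_lists_dict : List (String × List String)), Dom_count_multi_occurrence_languages word_lists_dict → Pre_count_multi_occurrence_languages word_lists_dict → Spec_count_multi_occurrence_languages word_lists_dict (count_multi_occurrence_languages word_lists_dict)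

-- ===== LEMMAS AND PROOFS =====

-- the languages (in dict order) whose word list contains w
def holdersD (d : List (String × List String)) (w : String) : List String :=
  d.filterMap (fun it => if w ∈ it.2 then some it.1 else none)

-- emit one word's pair counts
def emitW (ls : PySem.Dict String (PySem.Set String))
    (m : PySem.Dict (String × String) Int) (w : String) :
    PySem.Dict (String × String) Int :=
  (combos2 (bHolders ls w)).foldl bBump m

-- the words of ws that are new relative to seen, first occurrences only, in order
def news (seen : PySem.Set String) : List String → List String
  | [] => []
  | w :: ws => if w ∈ seen then news seen ws else w :: news (PySem.Set.add seen w) ws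

lemma combos2_short {α : Type} (l : List α) (h : l.length ≤ 1) : combos2 l = [] := by
  match l, h with
  | [], _ => rfl
  | [x], _ => rfl

lemma foldl_add_eq_append_news :
    ∀ (ws : List String) (seen : PySem.Set String),
      ws.foldl PySem.Set.add seen = seen ++ news seen ws := by
  intro ws
  induction ws with
  | nil => intro seen; simp [news]
  | cons w rest ih =>
    intro seen
    simp only [List.foldl_cons, news]
    by_cases hw : w ∈ seen
    · rw [PySem.Set.add_of_mem hw, if_pos hw, ih]
    · rw [if_neg hw, ih (PySem.Set.add seen w), PySem.Set.add_of_not_mem hw]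
      simp

-- B's inner word loop, split into its two components
lemma bfold_split (ls : PySem.Dict String (PySem.Set String)) :
    ∀ (ws : List String) (seen : PySem.Set String) (res : PySem.Dict (String × String) Int),
      ws.foldl (bWordStep ls) (seen, res) =
        (ws.foldl PySem.Set.add seen, (news seen ws).foldl (emitW ls) res) := by
  intro ws
  induction ws with
  | nil => intro seen res; simp [news]
  | cons w rest ih =>
    intro seen res
    simp only [List.foldl_cons, news, bWordStep]
    by_cases hw : w ∈ seen
    · rw [if_pos hw, if_pos hw, PySem.Set.add_of_mem hw, ih]
    · rw [if_neg hw, if_neg hw, ih]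
      rfl

-- a fold of per-item inner folds is a fold over the flattened word stream
lemma foldl_foldl_eq_flatMap {σ : Type}
    (f : σ → String → σ) :
    ∀ (d : List (String × List String)) (st : σ),
      d.foldl (fun st it => it.2.foldl f st) st = (d.flatMap (·.2)).foldl f st := by
  intro d
  induction d with
  | nil => intro st; rfl
  | cons it rest ih => intro st; simp only [List.foldl_cons, List.flatMap_cons,
      List.foldl_append]; exact ih _

-- A's per-item index update, on a duplicate-free word set
lemma index_fold_getD (lang : String) :
    ∀ (s : List String), s.Nodup →
      ∀ (idx : PySem.Dict String (List String)) (w : String),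
        (s.foldl (aIndex lang) idx).getD w [] =
          idx.getD w [] ++ (if w ∈ s then [lang] else []) := by
  intro s
  induction s with
  | nil => intro _ idx w; simp
  | cons x rest ih =>
    intro hnd idx w
    have hx : x ∉ rest := (List.nodup_cons.1 hnd).1
    simp only [List.foldl_cons]
    rw [ih (List.nodup_cons.1 hnd).2]
    by_cases hwx : w = x
    · subst hwx
      rw [if_neg hx, aIndex, PySem.Dict.getD_insert_self]
      simp
    · rw [aIndex, PySem.Dict.getD_insert_of_ne _ _ _ hwx]
      by_cases hw : w ∈ rest <;> simp [hw, hwx]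

-- the main fold of A, both components characterised
lemma astep_fold :
    ∀ (d : List (String × List String)) (wc : PySem.Dict String Int)
      (idx : PySem.Dict String (List String)),
      (d.foldl aStep (wc, idx)).1 = (d.flatMap (·.2)).foldl aCount wc ∧
      ∀ w, (d.foldl aStep (wc, idx)).2.getD w [] = idx.getD w [] ++ holdersD d w := by
  intro d
  induction d with
  | nil => intro wc idx; exact ⟨rfl, by intro w; simp [holdersD]⟩
  | cons it rest ih =>
    intro wc idx
    obtain ⟨lang, ws⟩ := it
    simp only [List.foldl_cons, List.flatMap_cons, List.foldl_append]
    constructor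
    · exact (ih _ _).1
    · intro w
      rw [(ih _ _).2 w]
      show ((PySem.Set.ofList ws).foldl (aIndex lang) idx).getD w [] ++ _ = _
      rw [index_fold_getD lang (PySem.Set.ofList ws) (PySem.Set.nodup_ofList ws) idx w]
      have hmem : (w ∈ PySem.Set.ofList ws) ↔ w ∈ ws := by
        simp [PySem.Set.mem_ofList]
      by_cases hw : w ∈ ws
      · rw [if_pos (hmem.2 hw)]
        simp [holdersD, hw]
      · rw [if_neg (fun hc => hw (hmem.1 hc))]
        simp [holdersD, hw]

-- each holding language contributes at least one occurrence
lemma holders_length_le :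
    ∀ (d : List (String × List String)) (w : String),
      (holdersD d w).length ≤ (d.flatMap (·.2)).count w := by
  intro d w
  induction d with
  | nil => simp [holdersD]
  | cons it rest ih =>
    have h2 := ih
    simp only [holdersD] at h2 ⊢
    by_cases hw : w ∈ it.2
    · have h1 : 1 ≤ it.2.count w := List.one_le_count_iff.2 hw
      simp only [List.filterMap_cons, List.flatMap_cons, List.count_append, if_pos hw,
        List.length_cons]
      omega
    · simp only [List.filterMap_cons, List.flatMap_cons, List.count_append, if_neg hw]
      omega

-- B's language sets, as items, given duplicate-free language keys
lemma bsets_items (d : List (String × List String))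
    (hnd : (d.map Prod.fst).Nodup) :
    (d.foldl (fun m it => m.insert it.1 (PySem.Set.ofList it.2)) PySem.Dict.empty).items
      = d.map (fun it => (it.1, PySem.Set.ofList it.2)) := by
  have h := PySem.Dict.items_foldl_insert_fresh (d := PySem.Dict.empty)
    (l := d) (k := Prod.fst) (v := fun it => PySem.Set.ofList it.2)
    (by intro a _; exact PySem.Dict.contains_empty _) hnd
  simpa using h

-- bHolders over those sets is holdersD
lemma bholders_eq (d : List (String × List String))
    (hnd : (d.map Prod.fst).Nodup) (w : String) :
    bHolders (d.foldl (fun m it => m.insert it.1 (PySem.Set.ofList it.2)) PySem.Dict.empty) w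
      = holdersD d w := by
  show List.filterMap _ (_ : PySem.Dict String (PySem.Set String)).items = _
  rw [bsets_items d hnd, List.filterMap_map]
  unfold holdersD
  apply List.filterMap_congr
  intro it _
  by_cases hw : w ∈ it.2
  · simp [hw, PySem.Set.mem_ofList]
  · simp [hw, PySem.Set.mem_ofList]

-- ===== VERDICT (by name: the statement is the Claim_ definition above) =====
theorem count_multi_occurrence_languages_spec : Claim_equal_count_multi_occurrence_languages := by
  intro d _hdom hpre
  unfold Spec_count_multi_occurrence_languages
  unfold count_multi_occurrence_languages count_multi_occurrence_languages_alt
  simp only []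
  apply congrArg (fun (r : PySem.Dict (String × String) Int) =>
    r.items.map (fun p => (p.1.1, p.1.2, p.2)))
  set W := d.flatMap (·.2) with hW
  set ls := d.foldl (fun m it => m.insert it.1 (PySem.Set.ofList it.2)) PySem.Dict.empty with hls
  obtain ⟨h1, h2⟩ := astep_fold d PySem.Dict.empty PySem.Dict.empty
  have h2' : ∀ w, (d.foldl aStep (PySem.Dict.empty, PySem.Dict.empty)).2.getD w []
      = holdersD d w := by
    intro w; rw [h2 w]; simp
  have hcounter : W.foldl aCount PySem.Dict.empty = PySem.Dict.counter W := rfl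
  rw [h1, hcounter, PySem.Dict.items_counter, List.foldl_map]
  simp only [h2']
  rw [foldl_foldl_eq_flatMap (bWordStep ls) d (PySem.Set.empty, PySem.Dict.empty)]
  rw [bfold_split ls W PySem.Set.empty PySem.Dict.empty]
  have hnews : news PySem.Set.empty W = PySem.Set.ofList W := by
    have h := foldl_add_eq_append_news W PySem.Set.empty
    have := h.symm
    simpa using this
  have hfun : (fun (m : PySem.Dict (String × String) Int) (k : String) =>
      if (k, (W.count k : Int)).2 > 1
        then (combos2 (holdersD d (k, (W.count k : Int)).1)).foldl aBump m else m)
      = emitW ls := by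
    funext m k
    simp only []
    rw [emitW, bholders_eq d hpre k]
    by_cases hc : (W.count k : Int) > 1
    · rw [if_pos hc]
      rfl
    · rw [if_neg hc]
      have hlen : (holdersD d k).length ≤ 1 := by
        have hh := holders_length_le d k
        rw [hW] at hc
        omega
      rw [combos2_short _ hlen]
      rfl
  rw [hnews, hfun]
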